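-- pv_equiv track=rewrite | github.com/m87-labs/moondream-station | tests/utils.py | parse_model_list
-- ===== SOURCE A (Python) =====
-- def parse_model_list(output):
--     models = {}
--     current_model = None
--
--     for line in output.split('\n'):
--         line = line.strip()
--         if line.startswith('Model: '):
--             current_model = line[7:].strip()
--             models[current_model] = {}
--         elif current_model and line.startswith('Release Date: '):
--             models[current_model]['release_date'] = line[14:].strip()
--         elif current_model and line.startswith('Size: '):
--             models[current_model]['model_size'] = line[6:].strip()
--         elif current_model and line.startswith('Notes: '):
--             models[current_model]['notes'] = line[7:].strip()
--
--     return models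
-- ===== SOURCE B (Python) =====
-- def _parse_fields(body):
--     """Parse the field lines of one model block into its attribute dict."""
--     fields = {}
--     for ln in body:
--         if ln.startswith('Release Date: '):
--             fields['release_date'] = ln[14:].strip()
--         elif ln.startswith('Size: '):
--             fields['model_size'] = ln[6:].strip()
--         elif ln.startswith('Notes: '):
--             fields['notes'] = ln[7:].strip()
--     return fields
--
--
-- def _split_blocks(lines):
--     """Cut lines (whose first line is a 'Model: ' header) into
--     (name, body-lines) blocks, one per header."""
--     n = len(lines)
--     blocks = []
--     i = 0
--     while i < n:
--         j = i + 1
--         while j < n and not lines[j].startswith('Model: '):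
--             j += 1
--         blocks.append((lines[i][7:].strip(), lines[i + 1:j]))
--         i = j
--     return blocks
--
--
-- def parse_model_list(output):
--     lines = [ln.strip() for ln in output.split('\n')]
--     i = 0
--     while i < len(lines) and not lines[i].startswith('Model: '):
--         i += 1
--     models = {}
--     for name, body in _split_blocks(lines[i:]):
--         models[name] = _parse_fields(body)
--     return models
-- ===== Notes on version B (the rewrite author's own statement) =====
-- stated objective: alternative
-- what changed: A's single fused state machine (a current_model register steering field writes into the result dict) is replaced by a two-phase decomposition: split the stripped lines into per-model blocks at the model-header lines (dropping lines before the first header), parse each block independently into its field dict, then assemble the blocks into the result dict in order.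
import Mathlib
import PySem

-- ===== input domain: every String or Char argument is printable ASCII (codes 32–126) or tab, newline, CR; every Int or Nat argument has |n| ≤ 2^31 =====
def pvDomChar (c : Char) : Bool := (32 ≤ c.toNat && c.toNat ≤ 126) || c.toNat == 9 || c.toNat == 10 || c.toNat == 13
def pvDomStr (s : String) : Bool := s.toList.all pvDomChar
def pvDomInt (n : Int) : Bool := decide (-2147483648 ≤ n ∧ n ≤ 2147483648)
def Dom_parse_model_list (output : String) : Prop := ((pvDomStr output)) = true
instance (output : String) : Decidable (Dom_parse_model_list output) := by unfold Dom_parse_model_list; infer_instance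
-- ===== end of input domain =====

-- B replaces A's fused state machine (a `current_model` register steering writes into the result dict)
-- by a two-phase decomposition: split the stripped lines into per-model blocks, parse each block
-- independently, then assemble; objective: alternative decomposition (same cost), return value only.

-- ===== PORT A =====
-- A's loop body: strip the line, header lines open a fresh entry, field lines write into the
-- current model's dict (`models[cm][k] = v` is Dict.modify; cm is always a present key when
-- reached, so modify = Python's item assignment there).
-- `elif current_model and …`: current_model is None or a stripped name, which is never the empty
-- string (a stripped line starting with "Model: " has a non-space character after the prefix),
-- so the truthiness test is exactly the `some` match.
def pvStepA (st : PySem.Dict String (PySem.Dict String String) × Option String) (raw : String) :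
    PySem.Dict String (PySem.Dict String String) × Option String :=
  let line := PySem.Str.strip raw
  if PySem.Str.startswith line "Model: " then
    let name := PySem.Str.strip (PySem.Str.slice line (some 7) none)
    (st.1.insert name PySem.Dict.empty, some name)
  else
    match st.2 with
    | none => st
    | some cm =>
      if PySem.Str.startswith line "Release Date: " then
        (st.1.modify cm PySem.Dict.empty
          (fun d => d.insert "release_date" (PySem.Str.strip (PySem.Str.slice line (some 14) none))), st.2)
      else if PySem.Str.startswith line "Size: " then
        (st.1.modify cm PySem.Dict.empty
          (fun d => d.insert "model_size" (PySem.Str.strip (PySem.Str.slice line (some 6) none))), st.2)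
      else if PySem.Str.startswith line "Notes: " then
        (st.1.modify cm PySem.Dict.empty
          (fun d => d.insert "notes" (PySem.Str.strip (PySem.Str.slice line (some 7) none))), st.2)
      else st

-- output.split('\n'): Str.split? is none only for an empty separator, so getD [] is exact here
def parse_model_list (output : String) : List (String × List (String × String)) :=
  ((((PySem.Str.split? output "\n").getD []).foldl pvStepA
      (PySem.Dict.empty, (none : Option String))).1).items.map (fun p => (p.1, p.2.items))

-- ===== PORT B =====
def pvIsHdr (line : String) : Bool := PySem.Str.startswith line "Model: "

-- _parse_fields: fold the field prefixes of one block into its attribute dict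
def pvFieldStep (fields : PySem.Dict String String) (ln : String) : PySem.Dict String String :=
  if PySem.Str.startswith ln "Release Date: " then
    fields.insert "release_date" (PySem.Str.strip (PySem.Str.slice ln (some 14) none))
  else if PySem.Str.startswith ln "Size: " then
    fields.insert "model_size" (PySem.Str.strip (PySem.Str.slice ln (some 6) none))
  else if PySem.Str.startswith ln "Notes: " then
    fields.insert "notes" (PySem.Str.strip (PySem.Str.slice ln (some 7) none))
  else fields

def pvParseFields (body : List String) : PySem.Dict String String :=
  body.foldl pvFieldStep PySem.Dict.empty

-- _split_blocks' inner scan (`while j < n and not lines[j].startswith(...)`): the body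
-- collected up to the next header, and the remainder from that header on
def pvSpanBody : List String → List String × List String
  | [] => ([], [])
  | ln :: rest =>
    if pvIsHdr ln then ([], ln :: rest)
    else
      let (b, r) := pvSpanBody rest
      (ln :: b, r)

theorem pvSpanBody_snd_length_le (l : List String) : (pvSpanBody l).2.length ≤ l.length := by
  induction l with
  | nil => simp [pvSpanBody]
  | cons ln rest ih =>
    simp only [pvSpanBody]
    split
    · simp
    · simpa using Nat.le_succ_of_le ih

-- _split_blocks' outer loop: the first line is a header; cut its body off and continue
-- from the next header
def pvBlocks : List String → List (String × List String)
  | [] => []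
  | head :: rest =>
    (PySem.Str.strip (PySem.Str.slice head (some 7) none), (pvSpanBody rest).1)
      :: pvBlocks (pvSpanBody rest).2
termination_by l => l.length
decreasing_by
  exact Nat.lt_succ_of_le (pvSpanBody_snd_length_le rest)

def parse_model_list_alt (output : String) : List (String × List (String × String)) :=
  let lines := ((PySem.Str.split? output "\n").getD []).map PySem.Str.strip
  let rest := lines.dropWhile (fun ln => !pvIsHdr ln)
  ((pvBlocks rest).foldl
      (fun (models : PySem.Dict String (PySem.Dict String String)) nb =>
        models.insert nb.1 (pvParseFields nb.2))
      PySem.Dict.empty).items.map (fun p => (p.1, p.2.items))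

-- ===== PRECONDITION & SPEC =====
def Spec_parse_model_list (output : String) (out : List (String × List (String × String))) : Prop := out = parse_model_list_alt output
instance (output : String) (out : List (String × List (String × String))) : Decidable (Spec_parse_model_list output out) := by unfold Spec_parse_model_list; infer_instance

-- ===== CLAIM (what is proved, stated in full; the proofs are below) =====
def Claim_equal_parse_model_list : Prop := ∀ (output : String), Dom_parse_model_list output → Spec_parse_model_list output (parse_model_list output)

-- ===== LEMMAS AND PROOFS =====

-- A's loop body on an already-stripped line
def pvStepS (st : PySem.Dict String (PySem.Dict String String) × Option String) (line : String) :
    PySem.Dict String (PySem.Dict String String) × Option String :=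
  if PySem.Str.startswith line "Model: " then
    let name := PySem.Str.strip (PySem.Str.slice line (some 7) none)
    (st.1.insert name PySem.Dict.empty, some name)
  else
    match st.2 with
    | none => st
    | some cm =>
      if PySem.Str.startswith line "Release Date: " then
        (st.1.modify cm PySem.Dict.empty
          (fun d => d.insert "release_date" (PySem.Str.strip (PySem.Str.slice line (some 14) none))), st.2)
      else if PySem.Str.startswith line "Size: " then
        (st.1.modify cm PySem.Dict.empty
          (fun d => d.insert "model_size" (PySem.Str.strip (PySem.Str.slice line (some 6) none))), st.2)
      else if PySem.Str.startswith line "Notes: " then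
        (st.1.modify cm PySem.Dict.empty
          (fun d => d.insert "notes" (PySem.Str.strip (PySem.Str.slice line (some 7) none))), st.2)
      else st

theorem pvStepS_hdr (st : PySem.Dict String (PySem.Dict String String) × Option String)
    (line : String) (h : pvIsHdr line = true) :
    pvStepS st line
      = (st.1.insert (PySem.Str.strip (PySem.Str.slice line (some 7) none)) PySem.Dict.empty,
         some (PySem.Str.strip (PySem.Str.slice line (some 7) none))) := by
  have h' : PySem.Str.startswith line "Model: " = true := h
  unfold pvStepS
  rw [if_pos h']

theorem pvStepS_none (M : PySem.Dict String (PySem.Dict String String))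
    (line : String) (h : pvIsHdr line = false) :
    pvStepS (M, none) line = (M, none) := by
  have h' : PySem.Str.startswith line "Model: " = false := h
  unfold pvStepS
  rw [if_neg (ne_true_of_eq_false h')]

theorem pvStepS_field (M : PySem.Dict String (PySem.Dict String String))
    (name : String) (d : PySem.Dict String String)
    (line : String) (h : pvIsHdr line = false) :
    pvStepS (M.insert name d, some name) line
      = (M.insert name (pvFieldStep d line), some name) := by
  have h' : PySem.Str.startswith line "Model: " = false := h
  have hmod : ∀ (k v : String),
      ((M.insert name d).modify name PySem.Dict.empty (fun f => f.insert k v))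
        = M.insert name (d.insert k v) := by
    intro k v
    have h1 : (M.insert name d).modify name PySem.Dict.empty (fun f => f.insert k v)
        = (M.insert name d).insert name
            (((M.insert name d).getD name PySem.Dict.empty).insert k v) :=
      PySem.Dict.ext_iff.mpr rfl
    rw [h1, PySem.Dict.getD_insert_self, PySem.Dict.insert_insert_self]
  unfold pvStepS pvFieldStep
  rw [if_neg (ne_true_of_eq_false h')]
  show (if PySem.Str.startswith line "Release Date: " = true then _ else _) = _
  split_ifs with h1 h2 h3 <;> simp [hmod]

-- with no current model, the leading non-header lines are no-ops
theorem pvFold_none (ls : List String) (M : PySem.Dict String (PySem.Dict String String)) :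
    ls.foldl pvStepS (M, none) = (ls.dropWhile (fun ln => !pvIsHdr ln)).foldl pvStepS (M, none) := by
  induction ls with
  | nil => rfl
  | cons ln rest ih =>
    cases hh : pvIsHdr ln with
    | true => simp [hh]
    | false =>
      simp only [List.foldl_cons, List.dropWhile_cons, hh, Bool.not_false, if_pos,
        pvStepS_none M ln hh]
      exact ih

-- folding a header-free block keeps the current model and folds its fields in place
theorem pvFold_block (body : List String) (h : ∀ ln ∈ body, pvIsHdr ln = false)
    (M : PySem.Dict String (PySem.Dict String String)) (name : String)
    (d : PySem.Dict String String) :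
    body.foldl pvStepS (M.insert name d, some name)
      = (M.insert name (body.foldl pvFieldStep d), some name) := by
  induction body generalizing d with
  | nil => rfl
  | cons ln rest ih =>
    have hln : pvIsHdr ln = false := h ln (by simp)
    have hrest : ∀ x ∈ rest, pvIsHdr x = false := fun x hx => h x (by simp [hx])
    simp only [List.foldl_cons, pvStepS_field M name d ln hln]
    exact ih hrest _

theorem pvSpanBody_append (l : List String) : (pvSpanBody l).1 ++ (pvSpanBody l).2 = l := by
  induction l with
  | nil => rfl
  | cons ln rest ih =>
    simp only [pvSpanBody]
    split
    · rfl
    · simpa using ih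

theorem pvSpanBody_fst_not_hdr (l : List String) :
    ∀ ln ∈ (pvSpanBody l).1, pvIsHdr ln = false := by
  induction l with
  | nil => simp [pvSpanBody]
  | cons ln rest ih =>
    simp only [pvSpanBody]
    split
    · simp
    · next h =>
      intro x hx
      simp only [List.mem_cons] at hx
      rcases hx with rfl | hx
      · simpa using h
      · exact ih x hx

theorem pvSpanBody_snd_hdr (l : List String) :
    (pvSpanBody l).2 = [] ∨ ∃ h t, (pvSpanBody l).2 = h :: t ∧ pvIsHdr h = true := by
  induction l with
  | nil => simp [pvSpanBody]
  | cons ln rest ih =>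
    simp only [pvSpanBody]
    split
    · next h => exact Or.inr ⟨ln, rest, rfl, h⟩
    · simpa using ih

-- the core correspondence: from a header (or nothing), A's fold computes B's block fold
theorem pvFold_main (n : Nat) : ∀ (ls : List String), ls.length ≤ n →
    (ls = [] ∨ ∃ h t, ls = h :: t ∧ pvIsHdr h = true) →
    ∀ (M : PySem.Dict String (PySem.Dict String String)) (c : Option String),
    (ls.foldl pvStepS (M, c)).1
      = (pvBlocks ls).foldl
          (fun (models : PySem.Dict String (PySem.Dict String String)) nb =>
            models.insert nb.1 (pvParseFields nb.2)) M := by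
  induction n with
  | zero =>
    intro ls hlen hhd M c
    have h0 : ls = [] := List.length_eq_zero_iff.mp (Nat.le_zero.mp hlen)
    subst h0
    simp [pvBlocks]
  | succ n ih =>
    intro ls hlen hhd M c
    rcases hhd with rfl | ⟨h, t, rfl, hh⟩
    · simp [pvBlocks]
    · obtain ⟨body, rest', hspan⟩ : ∃ b r, pvSpanBody t = (b, r) := ⟨_, _, rfl⟩
      have ht : t = body ++ rest' := by
        have := pvSpanBody_append t; rw [hspan] at this; exact this.symm
      have hbody : ∀ ln ∈ body, pvIsHdr ln = false := by
        have := pvSpanBody_fst_not_hdr t; rw [hspan] at this; exact this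
      have hrest' : rest' = [] ∨ ∃ h' t', rest' = h' :: t' ∧ pvIsHdr h' = true := by
        have := pvSpanBody_snd_hdr t; rw [hspan] at this; exact this
      have hlen' : rest'.length ≤ n := by
        have h1 : rest'.length ≤ t.length := by
          have := pvSpanBody_snd_length_le t; rw [hspan] at this; exact this
        simp only [List.length_cons] at hlen
        omega
      have hblocks : pvBlocks (h :: t)
          = (PySem.Str.strip (PySem.Str.slice h (some 7) none), body) :: pvBlocks rest' := by
        simp only [pvBlocks, hspan]
      calc ((h :: t).foldl pvStepS (M, c)).1
          = ((body ++ rest').foldl pvStepS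
              (M.insert (PySem.Str.strip (PySem.Str.slice h (some 7) none)) PySem.Dict.empty,
               some (PySem.Str.strip (PySem.Str.slice h (some 7) none)))).1 := by
            rw [List.foldl_cons, pvStepS_hdr _ _ hh, ht]
        _ = (rest'.foldl pvStepS
              (M.insert (PySem.Str.strip (PySem.Str.slice h (some 7) none))
                 (pvParseFields body),
               some (PySem.Str.strip (PySem.Str.slice h (some 7) none)))).1 := by
            rw [List.foldl_append, pvFold_block body hbody]
            rfl
        _ = (pvBlocks (h :: t)).foldl
              (fun (models : PySem.Dict String (PySem.Dict String String)) nb =>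
                models.insert nb.1 (pvParseFields nb.2)) M := by
            rw [hblocks, List.foldl_cons]
            exact ih rest' hlen' hrest' _ _

-- the first line surviving dropWhile satisfies the predicate's negation
theorem pvDropWhile_head (l : List String) :
    l.dropWhile (fun ln => !pvIsHdr ln) = []
      ∨ ∃ h t, l.dropWhile (fun ln => !pvIsHdr ln) = h :: t ∧ pvIsHdr h = true := by
  induction l with
  | nil => simp
  | cons ln rest ih =>
    cases h : pvIsHdr ln with
    | true => exact Or.inr ⟨ln, rest, by simp [h], h⟩
    | false => simpa [h] using ih

-- ===== VERDICT (by name: the statement is the Claim_ definition above) =====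
theorem parse_model_list_spec : Claim_equal_parse_model_list := by
  intro output _
  unfold Spec_parse_model_list parse_model_list parse_model_list_alt
  have h1 : ((PySem.Str.split? output "\n").getD []).foldl pvStepA
        (PySem.Dict.empty, (none : Option String))
      = (((PySem.Str.split? output "\n").getD []).map PySem.Str.strip).foldl pvStepS
        (PySem.Dict.empty, (none : Option String)) := by
    rw [List.foldl_map]
    rfl
  rw [h1, pvFold_none]
  have h2 := pvFold_main
    ((((PySem.Str.split? output "\n").getD []).map PySem.Str.strip).dropWhile
        (fun ln => !pvIsHdr ln)).length
    ((((PySem.Str.split? output "\n").getD []).map PySem.Str.strip).dropWhile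
        (fun ln => !pvIsHdr ln)) le_rfl
    (pvDropWhile_head _) PySem.Dict.empty none
  rw [h2]
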